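-- pv_equiv track=rewrite | github.com/paiml/depyler | examples/hard_pattern_cycle.py | functional_cycle_length
-- ===== SOURCE A (Python) =====
-- def functional_cycle_length(x0: int, limit: int) -> int:
--     """Find cycle length in f(x) = (x*x + 1) % limit."""
--     slow: int = x0
--     fast: int = x0
--     i: int = 0
--     while i < limit * 2:
--         slow = (slow * slow + 1) % limit
--         fast = (fast * fast + 1) % limit
--         fast = (fast * fast + 1) % limit
--         if slow == fast:
--             break
--         i = i + 1
--     length: int = 1
--     curr: int = (slow * slow + 1) % limit
--     while curr != slow:
--         curr = (curr * curr + 1) % limit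
--         length = length + 1
--     return length
-- ===== SOURCE B (Python) =====
-- def functional_cycle_length(x0: int, limit: int) -> int:
--     """Find cycle length in f(x) = (x*x + 1) % limit."""
--     power = 1
--     lam = 1
--     tortoise = x0
--     hare = (x0 * x0 + 1) % limit
--     while tortoise != hare:
--         if power == lam:
--             tortoise = hare
--             power *= 2
--             lam = 0
--         hare = (hare * hare + 1) % limit
--         lam += 1
--     return lam
-- ===== Notes on version B (the rewrite author's own statement) =====
-- stated objective: alternative
-- what changed: Replaced Floyd's two-phase tortoise/hare cycle detection (meeting phase plus a separate counting pass) with Brent's algorithm: a fixed tortoise, a hare scanning blocks of doubling length, returning the scan offset at the first match.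
import Mathlib
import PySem

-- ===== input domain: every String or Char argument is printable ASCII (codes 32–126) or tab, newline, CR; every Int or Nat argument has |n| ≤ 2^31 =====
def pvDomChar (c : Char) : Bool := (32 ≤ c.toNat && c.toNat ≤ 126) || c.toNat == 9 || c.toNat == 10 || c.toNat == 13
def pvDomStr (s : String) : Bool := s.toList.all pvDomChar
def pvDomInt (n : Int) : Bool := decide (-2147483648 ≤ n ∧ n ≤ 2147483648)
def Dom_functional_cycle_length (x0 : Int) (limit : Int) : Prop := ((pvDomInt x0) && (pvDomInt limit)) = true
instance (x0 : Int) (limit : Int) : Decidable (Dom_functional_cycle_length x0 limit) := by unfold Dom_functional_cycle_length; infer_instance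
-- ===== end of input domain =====

-- B replaces Floyd's two-phase tortoise/hare cycle detection with Brent's algorithm:
-- a fixed tortoise and a hare scanning blocks of doubling length (objective: alternative).

-- ===== PORT A =====
-- first while loop: i counts from 0 while i < limit*2; fuel = (limit*2).toNat iterations
def fclLoop1 (limit : Int) : Nat → Int → Int → Int
  | 0, slow, _ => slow
  | n+1, slow, fast =>
    let slow' := PySem.Int.mod (slow * slow + 1) limit
    let fast1 := PySem.Int.mod (fast * fast + 1) limit
    let fast' := PySem.Int.mod (fast1 * fast1 + 1) limit
    if slow' = fast' then slow' else fclLoop1 limit n slow' fast'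

-- second while loop (unbounded in Python; fuel only makes it total — proved sufficient under Pre_)
def fclLoop2 (limit slow : Int) : Nat → Int → Int → Int
  | 0, _, length => length
  | n+1, curr, length =>
    if curr = slow then length
    else fclLoop2 limit slow n (PySem.Int.mod (curr * curr + 1) limit) (length + 1)

def functional_cycle_length (x0 : Int) (limit : Int) : Int :=
  let slow := fclLoop1 limit (limit * 2).toNat x0 x0
  fclLoop2 limit slow limit.toNat (PySem.Int.mod (slow * slow + 1) limit) 1

-- ===== PORT B =====
-- Brent's algorithm: fixed tortoise, hare scans blocks of doubling length; fuel only makes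
-- the while loop total (proved sufficient under Pre_)
def fclBrent (limit : Int) : Nat → Int → Int → Int → Int → Int
  | 0, _, lam, _, _ => lam
  | n+1, power, lam, tortoise, hare =>
    if tortoise = hare then lam
    else
      let tortoise' := if power = lam then hare else tortoise
      let power' := if power = lam then power * 2 else power
      let lam0 := if power = lam then 0 else lam
      fclBrent limit n power' (lam0 + 1) tortoise' (PySem.Int.mod (hare * hare + 1) limit)

def functional_cycle_length_alt (x0 : Int) (limit : Int) : Int :=
  fclBrent limit (8 * (limit.toNat + 2)) 1 1 x0 (PySem.Int.mod (x0 * x0 + 1) limit)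

-- ===== PRECONDITION & SPEC =====
-- Pre_ excludes limit ≤ 0: Python A raises ZeroDivisionError on limit = 0 and loops forever on limit < 0.
def Pre_functional_cycle_length (x0 : Int) (limit : Int) : Prop := 1 ≤ limit
instance (x0 : Int) (limit : Int) : Decidable (Pre_functional_cycle_length x0 limit) := by
  unfold Pre_functional_cycle_length; infer_instance
def pvWitness_functional_cycle_length : Int × Int := (0, 5)

def Spec_functional_cycle_length (x0 : Int) (limit : Int) (out : Int) : Prop := out = functional_cycle_length_alt x0 limit
instance (x0 : Int) (limit : Int) (out : Int) : Decidable (Spec_functional_cycle_length x0 limit out) := by unfold Spec_functional_cycle_length; infer_instance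

-- ===== CLAIM (what is proved, stated in full; the proofs are below) =====
def Claim_equal_functional_cycle_length : Prop := ∀ (x0 : Int) (limit : Int), Dom_functional_cycle_length x0 limit → Pre_functional_cycle_length x0 limit → Spec_functional_cycle_length x0 limit (functional_cycle_length x0 limit)

-- ===== LEMMAS AND PROOFS =====

-- the iterated map f(x) = (x*x + 1) % limit and its orbit from x0
def pvF (limit y : Int) : Int := PySem.Int.mod (y * y + 1) limit
def pvSeq (limit x0 : Int) (n : Nat) : Int := (pvF limit)^[n] x0

lemma pvSeq_succ (limit x0 : Int) (n : Nat) :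
    pvSeq limit x0 (n + 1) = pvF limit (pvSeq limit x0 n) := by
  simp [pvSeq, Function.iterate_succ_apply']

lemma pvF_mem (limit y : Int) (h : 1 ≤ limit) : 0 ≤ pvF limit y ∧ pvF limit y < limit :=
  ⟨PySem.Int.mod_nonneg _ (by omega), PySem.Int.mod_lt _ (by omega)⟩

-- pigeonhole: among pvSeq 1 .. pvSeq (limit.toNat+1) some value repeats
lemma pv_exists_repeat (limit x0 : Int) (h : 1 ≤ limit) :
    ∃ s, (1 ≤ s ∧ ∃ t, 1 ≤ t ∧ t < s ∧ pvSeq limit x0 t = pvSeq limit x0 s) ∧ s ≤ limit.toNat + 1 := by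
  have hcard : (Finset.Ico (0 : Int) limit).card < (Finset.Icc 1 (limit.toNat + 1)).card := by
    rw [Int.card_Ico, Nat.card_Icc]
    omega
  have hmaps : ∀ a ∈ Finset.Icc 1 (limit.toNat + 1), pvSeq limit x0 a ∈ Finset.Ico (0 : Int) limit := by
    intro a ha
    simp only [Finset.mem_Icc] at ha
    obtain ⟨b, rfl⟩ : ∃ b, a = b + 1 := ⟨a - 1, by omega⟩
    rw [pvSeq_succ]
    have := pvF_mem limit (pvSeq limit x0 b) h
    simp only [Finset.mem_Ico]
    exact this
  obtain ⟨a, ha, b, hb, hab, heq⟩ :=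
    Finset.exists_ne_map_eq_of_card_lt_of_maps_to hcard hmaps
  simp only [Finset.mem_Icc] at ha hb
  rcases Nat.lt_or_ge a b with hlt | hge
  · exact ⟨b, ⟨by omega, a, by omega, hlt, heq⟩, by omega⟩
  · have hlt : b < a := by omega
    exact ⟨a, ⟨by omega, b, by omega, hlt, heq.symm⟩, by omega⟩

-- loop1 returns some orbit point pvSeq j which is periodic or has j = 2*limit
lemma fclLoop1_shape (limit x0 : Int) (h : 1 ≤ limit) :
    ∀ n (i : Nat), (↑(i + n) : Int) = limit * 2 →
      ∃ j, 1 ≤ j ∧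
        (Function.IsPeriodicPt (pvF limit) j (pvSeq limit x0 j) ∨ (↑j : Int) = limit * 2) ∧
        fclLoop1 limit n (pvSeq limit x0 i) (pvSeq limit x0 (2 * i)) = pvSeq limit x0 j := by
  intro n
  induction n with
  | zero =>
    intro i hi
    refine ⟨i, by omega, Or.inr (by omega), rfl⟩
  | succ m ih =>
    intro i hi
    have key : ∀ k, PySem.Int.mod (pvSeq limit x0 k * pvSeq limit x0 k + 1) limit
        = pvSeq limit x0 (k + 1) := fun k => (pvSeq_succ limit x0 k).symm
    have hslow := key i
    have hfast : PySem.Int.mod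
        (PySem.Int.mod (pvSeq limit x0 (2 * i) * pvSeq limit x0 (2 * i) + 1) limit *
          PySem.Int.mod (pvSeq limit x0 (2 * i) * pvSeq limit x0 (2 * i) + 1) limit + 1) limit
        = pvSeq limit x0 (2 * (i + 1)) := by
      rw [key (2 * i), key (2 * i + 1)]; congr 1
    simp only [fclLoop1, hslow, hfast]
    by_cases hbr : pvSeq limit x0 (i + 1) = pvSeq limit x0 (2 * (i + 1))
    · refine ⟨i + 1, by omega, Or.inl ?_, by simp [hbr]⟩
      show (pvF limit)^[i + 1] (pvSeq limit x0 (i + 1)) = pvSeq limit x0 (i + 1)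
      have : (pvF limit)^[i + 1] (pvSeq limit x0 (i + 1)) = pvSeq limit x0 (2 * (i + 1)) := by
        simp only [pvSeq, ← Function.iterate_add_apply]
        congr 1; omega
      rw [this, hbr]
    · simp only [if_neg hbr]
      exact ih (i + 1) (by push_cast at hi ⊢; omega)

-- loop2 computes the minimal period of a periodic point, given enough fuel
lemma fclLoop2_eq (limit y : Int) :
    ∀ n (k : Nat), 1 ≤ k → k ≤ Function.minimalPeriod (pvF limit) y →
      Function.minimalPeriod (pvF limit) y ≤ k + n →
      fclLoop2 limit y n ((pvF limit)^[k] y) (↑k) = ↑(Function.minimalPeriod (pvF limit) y) := by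
  intro n
  induction n with
  | zero =>
    intro k hk1 hkle hfuel
    have : k = Function.minimalPeriod (pvF limit) y := by omega
    simp [fclLoop2, this]
  | succ m ih =>
    intro k hk1 hkle hfuel
    simp only [fclLoop2]
    by_cases hc : (pvF limit)^[k] y = y
    · have : Function.minimalPeriod (pvF limit) y ≤ k :=
        Function.IsPeriodicPt.minimalPeriod_le (by omega) hc
      have : k = Function.minimalPeriod (pvF limit) y := by omega
      simp [this]
    · have hkP : k ≠ Function.minimalPeriod (pvF limit) y := by
        intro hEq
        exact hc (hEq ▸ Function.isPeriodicPt_minimalPeriod (pvF limit) y)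
      have hnext : PySem.Int.mod ((pvF limit)^[k] y * (pvF limit)^[k] y + 1) limit
          = (pvF limit)^[k + 1] y := (Function.iterate_succ_apply' (pvF limit) k y).symm
      simp only [if_neg hc, hnext]
      have := ih (k + 1) (by omega) (by omega) (by omega)
      rw [show ((k : Int) + 1) = ((k + 1 : Nat) : Int) by push_cast; ring]
      exact this

-- every periodic point on the orbit (and every orbit point from index T on) has minimal period S - T
lemma pv_same_cycle (limit x0 : Int) (S T : Nat)
    (hmemT : pvSeq limit x0 T ∈ Function.periodicPts (pvF limit))
    (hmpT : Function.minimalPeriod (pvF limit) (pvSeq limit x0 T) = S - T)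
    (t : Nat)
    (hcase : T ≤ t ∨ ∃ p, 1 ≤ p ∧ Function.IsPeriodicPt (pvF limit) p (pvSeq limit x0 t)) :
    Function.minimalPeriod (pvF limit) (pvSeq limit x0 t) = S - T := by
  by_cases hc : T ≤ t
  · have hiter : pvSeq limit x0 t = (pvF limit)^[t - T] (pvSeq limit x0 T) := by
      simp only [pvSeq, ← Function.iterate_add_apply]
      rw [show t - T + T = t by omega]
    rw [hiter, Function.minimalPeriod_apply_iterate hmemT, hmpT]
  · obtain ⟨p, hp1, hp⟩ := hcase.resolve_left hc
    have hmemt : pvSeq limit x0 t ∈ Function.periodicPts (pvF limit) :=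
      Function.mk_mem_periodicPts (by omega) hp
    have hiter : pvSeq limit x0 T = (pvF limit)^[T - t] (pvSeq limit x0 t) := by
      simp only [pvSeq, ← Function.iterate_add_apply]
      rw [show T - t + t = T by omega]
    have h2 := Function.minimalPeriod_apply_iterate hmemt (T - t)
    rw [← hiter] at h2
    rw [← h2, hmpT]

-- B's Brent loop returns S - T, given enough fuel; the tortoise always sits at index power - 1
lemma pv_brent_eq (limit x0 : Int) (S T : Nat) (hT1 : 1 ≤ T) (hTS : T < S)
    (hmemT : pvSeq limit x0 T ∈ Function.periodicPts (pvF limit))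
    (hmpT : Function.minimalPeriod (pvF limit) (pvSeq limit x0 T) = S - T) :
    ∀ n (power lam : Nat), 1 ≤ lam → lam ≤ power →
      (∀ k, 1 ≤ k → k < lam →
        pvSeq limit x0 (power - 1 + k) ≠ pvSeq limit x0 (power - 1)) →
      (power - lam) + 1 + (S - T) + (4 * max (T + 1) (S - T) - 2 * power) ≤ n →
      fclBrent limit n (↑power) (↑lam) (pvSeq limit x0 (power - 1))
          (pvSeq limit x0 (power - 1 + lam)) = ((S - T : Nat) : Int) := by
  intro n
  induction n with
  | zero => intro power lam _ _ _ hfuel; omega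
  | succ m ih =>
    intro power lam hlam1 hlampow hinv hfuel
    have hperiter : ∀ (t k : Nat), (pvF limit)^[k] (pvSeq limit x0 t) = pvSeq limit x0 (t + k) := by
      intro t k
      simp only [pvSeq, ← Function.iterate_add_apply]
      rw [Nat.add_comm k t]
    simp only [fclBrent]
    by_cases hmatch : pvSeq limit x0 (power - 1) = pvSeq limit x0 (power - 1 + lam)
    · -- match: lam is the minimal period of the tortoise, hence S - T
      simp only [if_pos hmatch]
      have hper : Function.IsPeriodicPt (pvF limit) lam (pvSeq limit x0 (power - 1)) := by
        show (pvF limit)^[lam] (pvSeq limit x0 (power - 1)) = pvSeq limit x0 (power - 1)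
        rw [hperiter, ← hmatch]
      have hmp := pv_same_cycle limit x0 S T hmemT hmpT (power - 1)
        (Or.inr ⟨lam, hlam1, hper⟩)
      have hle : Function.minimalPeriod (pvF limit) (pvSeq limit x0 (power - 1)) ≤ lam :=
        Function.IsPeriodicPt.minimalPeriod_le (by omega) hper
      have hmineq : S - T = lam := by
        by_contra hne
        have hlt : S - T < lam := by omega
        have hpmin := Function.isPeriodicPt_minimalPeriod (pvF limit)
          (pvSeq limit x0 (power - 1))
        rw [hmp] at hpmin
        have : pvSeq limit x0 (power - 1 + (S - T)) = pvSeq limit x0 (power - 1) := by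
          rw [← hperiter (power - 1) (S - T)]
          exact hpmin
        exact hinv (S - T) (by omega) hlt this
      rw [← hmineq]
    · simp only [if_neg hmatch]
      by_cases htel : (power : Int) = (lam : Int)
      · -- teleport: power = lam; this can only happen below W := max (T+1) (S-T)
        have hpl : power = lam := by exact_mod_cast htel
        have hpowW : power < max (T + 1) (S - T) := by
          by_contra hge
          have hge2 : max (T + 1) (S - T) ≤ power := Nat.le_of_not_lt hge
          have hTle : T ≤ power - 1 := by omega
          have hmp := pv_same_cycle limit x0 S T hmemT hmpT (power - 1) (Or.inl hTle)
          have hpmin := Function.isPeriodicPt_minimalPeriod (pvF limit)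
            (pvSeq limit x0 (power - 1))
          rw [hmp] at hpmin
          have hrep : pvSeq limit x0 (power - 1 + (S - T)) = pvSeq limit x0 (power - 1) := by
            rw [← hperiter (power - 1) (S - T)]
            exact hpmin
          have hSTle : S - T ≤ lam := by omega
          rcases Nat.lt_or_ge (S - T) lam with hlt | hge2
          · exact hinv (S - T) (by omega) hlt hrep
          · have : S - T = lam := by omega
            exact hmatch (by rw [← this]; exact hrep.symm)
        simp only [if_pos htel]
        have h1 : pvSeq limit x0 (power - 1 + lam) = pvSeq limit x0 (2 * power - 1) := by
          congr 1; omega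
        rw [h1]
        have h2 : PySem.Int.mod
            (pvSeq limit x0 (2 * power - 1) * pvSeq limit x0 (2 * power - 1) + 1) limit
            = pvSeq limit x0 (2 * power - 1 + 1) :=
          (pvSeq_succ limit x0 (2 * power - 1)).symm
        rw [h2]
        have := ih (2 * power) 1 (le_refl 1) (by omega) (by omega) (by omega)
        rw [show ((power : Int) * 2) = ((2 * power : Nat) : Int) by push_cast; ring,
          show ((0 : Int) + 1) = ((1 : Nat) : Int) by norm_num]
        exact this
      · -- ordinary step: lam < power, advance the hare
        have hpl : lam < power := by omega
        simp only [if_neg htel]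
        have h2 : PySem.Int.mod
            (pvSeq limit x0 (power - 1 + lam) * pvSeq limit x0 (power - 1 + lam) + 1) limit
            = pvSeq limit x0 (power - 1 + (lam + 1)) := by
          rw [show (power - 1 + (lam + 1)) = (power - 1 + lam) + 1 by omega]
          exact (pvSeq_succ limit x0 (power - 1 + lam)).symm
        rw [h2]
        have hinv' : ∀ k, 1 ≤ k → k < lam + 1 →
            pvSeq limit x0 (power - 1 + k) ≠ pvSeq limit x0 (power - 1) := by
          intro k hk1 hk2
          rcases Nat.lt_or_ge k lam with h | h
          · exact hinv k hk1 h
          · have : k = lam := by omega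
            subst this
            exact fun hc => hmatch hc.symm
        have := ih power (lam + 1) (by omega) (by omega) hinv' (by omega)
        rw [show ((lam : Int) + 1) = ((lam + 1 : Nat) : Int) by push_cast; ring]
        exact this

-- ===== VERDICT (by name: the statement is the Claim_ definition above) =====
theorem functional_cycle_length_spec : Claim_equal_functional_cycle_length := by
  intro x0 limit _ hpre
  unfold Spec_functional_cycle_length
  have hlim : 1 ≤ limit := hpre
  have hLlim : ((limit.toNat : Int)) = limit := Int.toNat_of_nonneg (by omega)
  obtain ⟨s0, hQ0, hs0le⟩ := pv_exists_repeat limit x0 hlim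
  have hex : ∃ s, 1 ≤ s ∧ ∃ t, 1 ≤ t ∧ t < s ∧ pvSeq limit x0 t = pvSeq limit x0 s := ⟨s0, hQ0⟩
  haveI : DecidablePred fun s => 1 ≤ s ∧ ∃ t, 1 ≤ t ∧ t < s ∧ pvSeq limit x0 t = pvSeq limit x0 s :=
    fun _ => Classical.dec _
  obtain ⟨hS1, T, hT1, hTS, hEq⟩ := Nat.find_spec hex
  set S := Nat.find hex with hSdef
  have hSle : S ≤ limit.toNat + 1 := le_trans (Nat.find_min' hex hQ0) hs0le
  have hNoRep : ∀ a b, 1 ≤ a → a < b → b < S → pvSeq limit x0 a ≠ pvSeq limit x0 b := by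
    intro a b ha hab hbS hcontra
    exact Nat.find_min hex hbS ⟨by omega, a, ha, hab, hcontra⟩
  have hperT : Function.IsPeriodicPt (pvF limit) (S - T) (pvSeq limit x0 T) := by
    show (pvF limit)^[S - T] (pvSeq limit x0 T) = pvSeq limit x0 T
    simp only [pvSeq, ← Function.iterate_add_apply]
    rw [show S - T + T = S by omega]
    exact hEq.symm
  have hmemT : pvSeq limit x0 T ∈ Function.periodicPts (pvF limit) :=
    Function.mk_mem_periodicPts (by omega) hperT
  have hmpT : Function.minimalPeriod (pvF limit) (pvSeq limit x0 T) = S - T := by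
    have hle := Function.IsPeriodicPt.minimalPeriod_le (n := S - T) (by omega) hperT
    have hpos := Function.minimalPeriod_pos_of_mem_periodicPts hmemT
    by_contra hne
    have hlt : Function.minimalPeriod (pvF limit) (pvSeq limit x0 T) < S - T := by omega
    have hp := Function.isPeriodicPt_minimalPeriod (pvF limit) (pvSeq limit x0 T)
    have hrep : pvSeq limit x0 (T + Function.minimalPeriod (pvF limit) (pvSeq limit x0 T))
        = pvSeq limit x0 T := by
      show (pvF limit)^[T + Function.minimalPeriod (pvF limit) (pvSeq limit x0 T)] x0
        = (pvF limit)^[T] x0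
      rw [Nat.add_comm, Function.iterate_add_apply]
      exact hp
    exact Nat.find_min hex
      (show T + Function.minimalPeriod (pvF limit) (pvSeq limit x0 T) < S by omega)
      ⟨by omega, T, hT1, by omega, hrep.symm⟩
  -- A side: run the first loop
  obtain ⟨j, hj1, hjcase, hslowEq⟩ := fclLoop1_shape limit x0 hlim (limit * 2).toNat 0
    (by push_cast [Int.toNat_of_nonneg (show (0:Int) ≤ limit * 2 by omega)]; ring)
  have hmpj := pv_same_cycle limit x0 S T hmemT hmpT j (by
    rcases hjcase with h | h
    · exact Or.inr ⟨j, hj1, h⟩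
    · exact Or.inl (by omega))
  have hA : functional_cycle_length x0 limit = ((S - T : Nat) : Int) := by
    show fclLoop2 limit (fclLoop1 limit (limit * 2).toNat x0 x0) limit.toNat
      (PySem.Int.mod
        (fclLoop1 limit (limit * 2).toNat x0 x0 * fclLoop1 limit (limit * 2).toNat x0 x0 + 1)
        limit) 1 = ((S - T : Nat) : Int)
    have hx0 : pvSeq limit x0 0 = x0 := rfl
    rw [show fclLoop1 limit (limit * 2).toNat x0 x0
        = fclLoop1 limit (limit * 2).toNat (pvSeq limit x0 0) (pvSeq limit x0 (2 * 0)) from rfl,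
      hslowEq]
    have h1 : PySem.Int.mod (pvSeq limit x0 j * pvSeq limit x0 j + 1) limit
        = (pvF limit)^[1] (pvSeq limit x0 j) := by
      rw [Function.iterate_one]; rfl
    rw [h1]
    have := fclLoop2_eq limit (pvSeq limit x0 j) limit.toNat 1 (le_refl 1)
      (by omega) (by omega)
    rw [hmpj] at this
    simpa using this
  have hB : functional_cycle_length_alt x0 limit = ((S - T : Nat) : Int) := by
    show fclBrent limit (8 * (limit.toNat + 2)) 1 1 x0 (PySem.Int.mod (x0 * x0 + 1) limit)
      = ((S - T : Nat) : Int)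
    have hx1 : PySem.Int.mod (x0 * x0 + 1) limit = pvSeq limit x0 (1 - 1 + 1) :=
      (pvSeq_succ limit x0 0).symm
    rw [hx1]
    have := pv_brent_eq limit x0 S T hT1 hTS hmemT hmpT (8 * (limit.toNat + 2)) 1 1
      (le_refl 1) (le_refl 1) (by omega) (by omega)
    simpa using this
  rw [hA, hB]
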